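-- pv_equiv track=rewrite | github.com/lungnahahd/Python_Prac | Programmers/Level2/JoyStick.py | solution
-- ===== SOURCE A (Python) =====
-- def solution(name):
--     answer = 0
--     whereA = []
--     beforeA = False
--     temp = -1
--     # N을 기준으로 이동하기(따악 중간)
--     # ord(A) = 65, ord(Z) = 90 , ord(N) = 78
--     for idx, word in enumerate(name):
--         wordCost = ord(word)
--         if wordCost <= 78:
--             answer += (wordCost - 65)
--             if wordCost == 65:
--                 if not beforeA:
--                     beforeA = True
--                     temp = idx
--             else:
--                 if beforeA:
--                     whereA.append((temp,idx-1))
--                     beforeA = False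
--         else:
--             answer += (91 - wordCost)
--             if beforeA:
--                 whereA.append((temp,idx-1))
--                 beforeA = False
--
--     if beforeA:
--         whereA.append((temp,len(name)-1))
--     ##################################### 여기까지가 알파벳 기준 JoyStick 처리
--     moveCnt = len(name) - 1
--     for idx in range(len(whereA)):
--         start, end = whereA[idx]
--         tempCnt = 0
--         startGo = start - 1
--         if startGo <0:
--             startGo = 0
--         endGo = len(name) - end -1
--         if endGo < 0:
--             endGo = 0
--         moveCnt = min(moveCnt,(endGo*2+startGo),(startGo*2+endGo))
--     answer += moveCnt
--     return answer
-- ===== SOURCE B (Python) =====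
-- def solution(name):
--     n = len(name)
--     answer = sum(min(ord(ch) - 65, 91 - ord(ch)) for ch in name)
--     move = n - 1
--     for i in range(n):
--         nxt = i + 1
--         while nxt < n and name[nxt] == 'A':
--             nxt += 1
--         move = min(move, 2 * i + (n - nxt), i + 2 * (n - nxt))
--     return answer + move
-- ===== Notes on version B (the rewrite author's own statement) =====
-- stated objective: simpler
-- what changed: Replaced A's two-phase design (a flag/temp state machine that materialises a list of maximal 'A'-run intervals, then a second loop over that list with clamped boundary arithmetic) by a single direct loop over each cursor position that skips following 'A's inline, plus a one-line sum for the up/down cost.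
import Mathlib
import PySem

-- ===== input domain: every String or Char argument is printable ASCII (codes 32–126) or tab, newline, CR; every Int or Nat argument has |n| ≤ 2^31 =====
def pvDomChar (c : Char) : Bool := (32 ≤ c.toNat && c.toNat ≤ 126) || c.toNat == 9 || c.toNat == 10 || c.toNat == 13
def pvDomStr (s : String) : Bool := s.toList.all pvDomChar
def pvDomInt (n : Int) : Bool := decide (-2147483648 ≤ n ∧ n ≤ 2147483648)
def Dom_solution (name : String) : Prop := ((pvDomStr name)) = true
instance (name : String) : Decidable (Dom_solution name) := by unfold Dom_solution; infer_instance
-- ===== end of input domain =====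

-- B replaces A's A-run bookkeeping (flag/temp state machine + run list) by a direct per-index
-- scan with an inner skip over 'A's; same return value on every input (objective: simpler).

-- ===== PORT A =====
-- loop body of A's first (enumerate) loop: state (answer, whereA, beforeA, temp)
def aStep (st : Int × List (Int × Int) × Bool × Int) (p : Int × Char) :
    Int × List (Int × Int) × Bool × Int :=
  let answer := st.1; let whereA := st.2.1; let beforeA := st.2.2.1; let temp := st.2.2.2
  let idx := p.1
  let wordCost : Int := (p.2.toNat : Int)
  if wordCost ≤ 78 then
    let answer := answer + (wordCost - 65)
    if wordCost = 65 then
      if !beforeA then (answer, whereA, true, idx)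
      else (answer, whereA, beforeA, temp)
    else
      if beforeA then (answer, whereA ++ [(temp, idx - 1)], false, temp)
      else (answer, whereA, beforeA, temp)
  else
    let answer := answer + (91 - wordCost)
    if beforeA then (answer, whereA ++ [(temp, idx - 1)], false, temp)
    else (answer, whereA, beforeA, temp)

-- loop body of A's second loop (min(moveCnt, x, y) = min (min moveCnt x) y)
def aCost (n : Int) (m : Int) (se : Int × Int) : Int :=
  let startGo := se.1 - 1
  let startGo := if startGo < 0 then 0 else startGo
  let endGo := n - se.2 - 1
  let endGo := if endGo < 0 then 0 else endGo
  min (min m (endGo * 2 + startGo)) (startGo * 2 + endGo)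

def solution (name : String) : Int :=
  let l := name.toList
  let n : Int := (l.length : Int)
  let st := (PySem.List.enumerate l 0).foldl aStep (0, [], false, -1)
  let answer := st.1
  let whereA := if st.2.2.1 then st.2.1 ++ [(st.2.2.2, n - 1)] else st.2.1
  let moveCnt := whereA.foldl (aCost n) (n - 1)
  answer + moveCnt

-- ===== PORT B =====
-- the inner 'while nxt < n and name[nxt] == 'A': nxt += 1' of Source B
def altSkip (l : List Char) (nxt : Int) : Int :=
  if h : nxt < (l.length : Int) ∧ PySem.List.pyGet? l nxt = some 'A'
  then altSkip l (nxt + 1) else nxt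
termination_by ((l.length : Int) - nxt).toNat
decreasing_by omega

-- loop body of Source B's for-loop over i
def bStep (l : List Char) (n : Int) (m : Int) (i : Int) : Int :=
  let nxt := altSkip l (i + 1)
  min (min m (2 * i + (n - nxt))) (i + 2 * (n - nxt))

def solution_alt (name : String) : Int :=
  let l := name.toList
  let n : Int := (l.length : Int)
  let answer := l.foldl (fun a c => a + min ((c.toNat : Int) - 65) (91 - (c.toNat : Int))) 0
  let move := (PySem.List.pyRange 0 n 1).foldl (bStep l n) (n - 1)
  answer + move

-- ===== PRECONDITION & SPEC =====
def Spec_solution (name : String) (out : Int) : Prop := out = solution_alt name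
instance (name : String) (out : Int) : Decidable (Spec_solution name out) := by unfold Spec_solution; infer_instance

-- ===== CLAIM (what is proved, stated in full; the proofs are below) =====
def Claim_equal_solution : Prop := ∀ (name : String), Dom_solution name → Spec_solution name (solution name)


-- ===== LEMMAS AND PROOFS =====

-- per-character up/down cost as A computes it
def udA (c : Char) : Int := if (c.toNat : Int) ≤ 78 then (c.toNat : Int) - 65 else 91 - (c.toNat : Int)

-- the run-tracking component of A's first loop, isolated
def runFold : List Char → Nat → List (Int × Int) × Bool × Int → List (Int × Int) × Bool × Int
  | [], _, s => s
  | c :: t, k, (w, b, tm) =>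
    if c = 'A' then
      if b then runFold t (k + 1) (w, b, tm) else runFold t (k + 1) (w, true, (k : Int))
    else
      if b then runFold t (k + 1) (w ++ [(tm, (k : Int) - 1)], false, tm)
      else runFold t (k + 1) (w, b, tm)

def AAt (l : List Char) (j : Int) : Prop := l.getD j.toNat '*' = 'A'

def GoodEntry (l : List Char) (se : Int × Int) : Prop :=
  0 ≤ se.1 ∧ se.1 ≤ se.2 ∧ se.2 < (l.length : Int) ∧
  (∀ j : Int, se.1 ≤ j → j ≤ se.2 → AAt l j) ∧
  (se.2 + 1 = (l.length : Int) ∨ ¬ AAt l (se.2 + 1))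

def Cov (w : List (Int × Int)) (j : Int) : Prop := ∃ se ∈ w, se.1 ≤ j ∧ j ≤ se.2

def finalW (l : List Char) : List (Int × Int) :=
  let r := runFold l 0 ([], false, -1)
  if r.2.1 then r.1 ++ [(r.2.2, (l.length : Int) - 1)] else r.1

lemma udA_eq_min (c : Char) : udA c = min ((c.toNat : Int) - 65) (91 - (c.toNat : Int)) := by
  unfold udA; split <;> omega

lemma foldl_ud_shift (t : List Char) (a : Int) :
    t.foldl (fun s c => s + udA c) a = a + t.foldl (fun s c => s + udA c) 0 := by
  induction t generalizing a with
  | nil => simp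
  | cons c t ih => simp only [List.foldl_cons]; rw [ih, ih (0 + udA c)]; ring

lemma charA_iff (c : Char) : ((c.toNat : Int) = 65) ↔ c = 'A' := by
  constructor
  · intro h
    have h1 : c.toNat = 65 := by omega
    have := Char.ofNat_toNat c
    rw [h1] at this
    exact this.symm
  · intro h; subst h; rfl

lemma aFold_split (t : List Char) (k : Nat) (a : Int) (w : List (Int × Int)) (b : Bool) (tm : Int) :
    (PySem.List.enumerate t (k : Int)).foldl aStep (a, w, b, tm) =
      (a + t.foldl (fun s c => s + udA c) 0, runFold t k (w, b, tm)) := by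
  induction t generalizing k a w b tm with
  | nil => simp [PySem.List.enumerate_nil, runFold]
  | cons c t ih =>
    rw [PySem.List.enumerate_cons]
    simp only [List.foldl_cons]
    have hcast : (k : Int) + 1 = ((k + 1 : Nat) : Int) := by push_cast; ring
    have hud : (c :: t).foldl (fun s c => s + udA c) 0 = udA c + t.foldl (fun s c => s + udA c) 0 := by
      simp only [List.foldl_cons]; rw [foldl_ud_shift]; ring
    by_cases hA : c = 'A'
    · have h65 : (c.toNat : Int) = 65 := (charA_iff c).2 hA
      have hstep : aStep (a, w, b, tm) ((k : Int), c) =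
          (a + udA c, w, true, if b then tm else (k : Int)) := by
        simp only [aStep, udA]
        rw [if_pos (by omega : (c.toNat : Int) ≤ 78), if_pos (by omega : (c.toNat : Int) ≤ 78),
          if_pos h65]
        cases b <;> simp
      have hrun : runFold (c :: t) k (w, b, tm) =
          runFold t (k + 1) (w, true, if b then tm else (k : Int)) := by
        show (if c = 'A' then _ else _) = _
        rw [if_pos hA]
        cases b <;> simp
      rw [hstep, hcast, ih, hrun, foldl_ud_shift t (0 + udA c)]
      refine Prod.ext ?_ rfl
      ring
    · have h65 : ¬ (c.toNat : Int) = 65 := fun h => hA ((charA_iff c).1 h)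
      have hstep : aStep (a, w, b, tm) ((k : Int), c) =
          (a + udA c, (if b then w ++ [(tm, (k : Int) - 1)] else w), false, tm) := by
        simp only [aStep, udA]
        by_cases h78 : (c.toNat : Int) ≤ 78
        · rw [if_pos h78, if_pos h78, if_neg h65]
          cases b <;> simp
        · rw [if_neg h78, if_neg h78]
          cases b <;> simp
      have hrun : runFold (c :: t) k (w, b, tm) =
          runFold t (k + 1) ((if b then w ++ [(tm, (k : Int) - 1)] else w), false, tm) := by
        show (if c = 'A' then _ else _) = _
        rw [if_neg hA]
        cases b <;> simp
      rw [hstep, hcast, ih, hrun, foldl_ud_shift t (0 + udA c)]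
      refine Prod.ext ?_ rfl
      ring

lemma runFold_cons (c : Char) (t : List Char) (k : Nat) (w : List (Int × Int)) (b : Bool) (tm : Int) :
    runFold (c :: t) k (w, b, tm) =
      if c = 'A' then
        (if b then runFold t (k + 1) (w, b, tm) else runFold t (k + 1) (w, true, (k : Int)))
      else
        (if b then runFold t (k + 1) (w ++ [(tm, (k : Int) - 1)], false, tm)
         else runFold t (k + 1) (w, b, tm)) := rfl

lemma AAt_nat (L : List Char) (j : Nat) : AAt L (j : Int) ↔ L.getD j '*' = 'A' := by
  unfold AAt; simp

lemma AAt_toNat (L : List Char) (j : Int) (h : 0 ≤ j) :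
    AAt L j ↔ AAt L ((j.toNat : Nat) : Int) := by
  rw [Int.toNat_of_nonneg h]

lemma runFold_inv (L : List Char) (t : List Char) (k : Nat)
    (hk : k ≤ L.length) (ht : t = L.drop k)
    (w : List (Int × Int)) (b : Bool) (tm : Int)
    (hw : ∀ se ∈ w, GoodEntry L se)
    (hcov : ∀ j : Nat, j < k → AAt L (j : Int) → Cov w (j : Int) ∨ (b = true ∧ tm ≤ (j : Int)))
    (hopen : b = true → 0 ≤ tm ∧ tm < (k : Int) ∧ ∀ j : Nat, tm ≤ (j : Int) → j < k → AAt L (j : Int)) :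
    (∀ se ∈ (if (runFold t k (w, b, tm)).2.1 then
        (runFold t k (w, b, tm)).1 ++ [((runFold t k (w, b, tm)).2.2, (L.length : Int) - 1)]
      else (runFold t k (w, b, tm)).1), GoodEntry L se) ∧
    (∀ j : Nat, j < L.length → AAt L (j : Int) →
      Cov (if (runFold t k (w, b, tm)).2.1 then
        (runFold t k (w, b, tm)).1 ++ [((runFold t k (w, b, tm)).2.2, (L.length : Int) - 1)]
      else (runFold t k (w, b, tm)).1) (j : Int)) := by
  induction t generalizing k w b tm with
  | nil =>
    have hklen : k = L.length := by
      have := congrArg List.length ht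
      simp [List.length_drop] at this
      omega
    subst hklen
    simp only [runFold]
    cases b with
    | false =>
      refine ⟨by simpa using hw, ?_⟩
      intro j hj hA
      rcases hcov j hj hA with h | h
      · simpa using h
      · exact absurd h.1 (by simp)
    | true =>
      obtain ⟨htm0, htmk, hall⟩ := hopen rfl
      constructor
      · intro se hse
        rcases List.mem_append.1 hse with h | h
        · exact hw se h
        · simp only [List.mem_singleton] at h
          subst h
          refine ⟨htm0, by omega, by omega, ?_, Or.inl (by omega)⟩
          intro j h1 h2
          rw [AAt_toNat L j (by omega)]
          exact hall j.toNat (by omega) (by omega)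
      · intro j hj hA
        rcases hcov j hj hA with h | h
        · obtain ⟨se, hse, h1, h2⟩ := h
          exact ⟨se, List.mem_append_left _ hse, h1, h2⟩
        · exact ⟨(tm, (L.length : Int) - 1), List.mem_append_right _ (by simp), h.2, by omega⟩
  | cons c t ihind =>
    have hlen : k < L.length := by
      have := congrArg List.length ht
      simp [List.length_drop] at this
      omega
    have hdrop := List.drop_eq_getElem_cons hlen
    rw [hdrop] at ht
    injection ht with hc ht'
    have hAk : AAt L (k : Int) ↔ c = 'A' := by
      rw [AAt_nat, List.getD_eq_getElem L '*' hlen, hc]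
    have hcast : ((k + 1 : Nat) : Int) = (k : Int) + 1 := by push_cast; ring
    rw [runFold_cons]
    by_cases hA : c = 'A'
    · rw [if_pos hA]
      cases b with
      | true =>
        refine ihind (k + 1) (by omega) ht' w true tm hw ?_ ?_
        · intro j hj hAj
          rcases Nat.lt_or_ge j k with h | h
          · exact hcov j h hAj
          · have : j = k := by omega
            subst this
            obtain ⟨_, h2, _⟩ := hopen rfl
            exact Or.inr ⟨rfl, by omega⟩
        · intro _
          obtain ⟨h1, h2, h3⟩ := hopen rfl
          refine ⟨h1, by omega, ?_⟩
          intro j hj1 hj2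
          rcases Nat.lt_or_ge j k with h | h
          · exact h3 j hj1 h
          · have : j = k := by omega
            subst this
            exact hAk.2 hA
      | false =>
        simp only [Bool.false_eq_true, if_neg (by simp : ¬False)]
        show _ ∧ _
        refine ihind (k + 1) (by omega) ht' w true (k : Int) hw ?_ ?_
        · intro j hj hAj
          rcases Nat.lt_or_ge j k with h | h
          · rcases hcov j h hAj with hres | hres
            · exact Or.inl hres
            · exact absurd hres.1 (by simp)
          · have : j = k := by omega
            subst this
            exact Or.inr ⟨rfl, by omega⟩
        · intro _
          refine ⟨by omega, by omega, ?_⟩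
          intro j hj1 hj2
          have : j = k := by omega
          subst this
          exact hAk.2 hA
    · rw [if_neg hA]
      have hnA : ¬ AAt L (k : Int) := fun h => hA (hAk.1 h)
      cases b with
      | true =>
        obtain ⟨htm0, htmk, hall⟩ := hopen rfl
        refine ihind (k + 1) (by omega) ht' (w ++ [(tm, (k : Int) - 1)]) false tm ?_ ?_ (by simp)
        · intro se hse
          rcases List.mem_append.1 hse with h | h
          · exact hw se h
          · simp only [List.mem_singleton] at h
            subst h
            refine ⟨htm0, by omega, by omega, ?_, Or.inr (by simpa using hnA)⟩
            intro j h1 h2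
            rw [AAt_toNat L j (by omega)]
            exact hall j.toNat (by omega) (by omega)
        · intro j hj hAj
          have hjk : j < k := by
            rcases Nat.lt_or_ge j k with h | h
            · exact h
            · have : j = k := by omega
              subst this
              exact absurd hAj hnA
          rcases hcov j hjk hAj with h | h
          · obtain ⟨se, hse, h1, h2⟩ := h
            exact Or.inl ⟨se, List.mem_append_left _ hse, h1, h2⟩
          · exact Or.inl ⟨(tm, (k : Int) - 1), List.mem_append_right _ (by simp), h.2, by omega⟩
      | false =>
        simp only [Bool.false_eq_true, if_neg (by simp : ¬False)]
        show _ ∧ _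
        refine ihind (k + 1) (by omega) ht' w false tm hw ?_ (by simp)
        intro j hj hAj
        have hjk : j < k := by
          rcases Nat.lt_or_ge j k with h | h
          · exact h
          · have : j = k := by omega
            subst this
            exact absurd hAj hnA
        exact hcov j hjk hAj

lemma finalW_sound (l : List Char) : ∀ se ∈ finalW l, GoodEntry l se := by
  have := runFold_inv l l 0 (by omega) (by simp) [] false (-1)
    (by intro se h; simp at h) (by intro j h; omega) (by intro h; simp at h)
  exact this.1

lemma finalW_cov (l : List Char) :
    ∀ j : Nat, j < l.length → AAt l (j : Int) → Cov (finalW l) (j : Int) := by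
  have := runFold_inv l l 0 (by omega) (by simp) [] false (-1)
    (by intro se h; simp at h) (by intro j h; omega) (by intro h; simp at h)
  exact this.2

lemma AAt_iff_pyGet (l : List Char) (j : Int) (h0 : 0 ≤ j) (h : j < (l.length : Int)) :
    AAt l j ↔ PySem.List.pyGet? l j = some 'A' := by
  rw [PySem.List.pyGet?_eq_some_getElem l h0 h]
  unfold AAt
  rw [List.getD_eq_getElem l '*' (by omega)]
  simp

lemma altSkip_ge (l : List Char) (i : Int) : i ≤ altSkip l i := by
  induction i using altSkip.induct l with
  | case1 x hx ih => rw [altSkip, dif_pos hx]; omega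
  | case2 x hx => rw [altSkip, dif_neg hx]

lemma altSkip_le (l : List Char) (i : Int) (h : i ≤ (l.length : Int)) :
    altSkip l i ≤ (l.length : Int) := by
  induction i using altSkip.induct l with
  | case1 x hx ih => rw [altSkip, dif_pos hx]; exact ih (by omega)
  | case2 x hx => rw [altSkip, dif_neg hx]; exact h

lemma altSkip_mid (l : List Char) (i : Int) :
    ∀ j : Int, i ≤ j → j < altSkip l i → PySem.List.pyGet? l j = some 'A' := by
  induction i using altSkip.induct l with
  | case1 x hx ih =>
    intro j h1 h2
    rw [altSkip, dif_pos hx] at h2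
    rcases eq_or_lt_of_le h1 with rfl | h1
    · exact hx.2
    · exact ih j (by omega) h2
  | case2 x hx =>
    intro j h1 h2
    rw [altSkip, dif_neg hx] at h2
    omega

lemma altSkip_stop (l : List Char) (i : Int) (h : altSkip l i < (l.length : Int)) :
    ¬ PySem.List.pyGet? l (altSkip l i) = some 'A' := by
  induction i using altSkip.induct l with
  | case1 x hx ih => rw [altSkip, dif_pos hx] at h ⊢; exact ih h
  | case2 x hx => rw [altSkip, dif_neg hx] at h ⊢; tauto

lemma altSkip_eq (l : List Char) (i m : Int) (him : i ≤ m) (hm : m ≤ (l.length : Int))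
    (hall : ∀ j : Int, i ≤ j → j < m → PySem.List.pyGet? l j = some 'A')
    (hstop : m = (l.length : Int) ∨ ¬ PySem.List.pyGet? l m = some 'A') :
    altSkip l i = m := by
  induction i using altSkip.induct l with
  | case1 x hx ih =>
    rw [altSkip, dif_pos hx]
    rcases eq_or_lt_of_le him with rfl | hlt
    · rcases hstop with h | h
      · omega
      · exact absurd hx.2 h
    · exact ih (by omega) (fun j hj1 hj2 => hall j (by omega) hj2)
  | case2 x hx =>
    rw [altSkip, dif_neg hx]
    rcases eq_or_lt_of_le him with rfl | hlt
    · rfl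
    · exfalso
      have := hall x (le_refl x) hlt
      exact hx ⟨by omega, this⟩

lemma foldl_min2_le_init {α : Type} (f g : α → Int) (xs : List α) (m : Int) :
    xs.foldl (fun m x => min (min m (f x)) (g x)) m ≤ m := by
  induction xs generalizing m with
  | nil => simp
  | cons x xs ih =>
    simp only [List.foldl_cons]
    calc xs.foldl (fun m x => min (min m (f x)) (g x)) (min (min m (f x)) (g x))
        ≤ min (min m (f x)) (g x) := ih _
      _ ≤ m := by omega

lemma foldl_min2_le_mem {α : Type} (f g : α → Int) (xs : List α) (m : Int) {x : α} (hx : x ∈ xs) :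
    xs.foldl (fun m x => min (min m (f x)) (g x)) m ≤ min (f x) (g x) := by
  induction xs generalizing m with
  | nil => simp at hx
  | cons y ys ih =>
    simp only [List.foldl_cons]
    rcases List.mem_cons.1 hx with h | h
    · subst h
      calc ys.foldl (fun m x => min (min m (f x)) (g x)) (min (min m (f x)) (g x))
          ≤ min (min m (f x)) (g x) := foldl_min2_le_init f g ys _
        _ ≤ min (f x) (g x) := by omega
    · exact ih _ h

lemma le_foldl_min2 {α : Type} (f g : α → Int) (xs : List α) (m c : Int)
    (h0 : c ≤ m) (h : ∀ x ∈ xs, c ≤ f x ∧ c ≤ g x) :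
    c ≤ xs.foldl (fun m x => min (min m (f x)) (g x)) m := by
  induction xs generalizing m with
  | nil => simpa
  | cons x xs ih =>
    simp only [List.foldl_cons]
    refine ih (min (min m (f x)) (g x)) ?_ (fun y hy => h y (List.mem_cons_of_mem _ hy))
    have := h x (List.mem_cons_self ..)
    omega

def sgOf (se : Int × Int) : Int := if se.1 - 1 < 0 then 0 else se.1 - 1
def egOf (n : Int) (se : Int × Int) : Int := if n - se.2 - 1 < 0 then 0 else n - se.2 - 1
def fAx (n : Int) (se : Int × Int) : Int := egOf n se * 2 + sgOf se
def gAx (n : Int) (se : Int × Int) : Int := sgOf se * 2 + egOf n se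
def fBx (l : List Char) (n : Int) (i : Int) : Int := 2 * i + (n - altSkip l (i + 1))
def gBx (l : List Char) (n : Int) (i : Int) : Int := i + 2 * (n - altSkip l (i + 1))

lemma aCost_eq (n : Int) : aCost n = fun m se => min (min m (fAx n se)) (gAx n se) := by
  funext m se; simp only [aCost, fAx, gAx, sgOf, egOf]

lemma bStep_eq (l : List Char) (n : Int) :
    bStep l n = fun m i => min (min m (fBx l n i)) (gBx l n i) := by
  funext m i; simp only [bStep, fBx, gBx]

lemma move_eq (l : List Char) :
    (finalW l).foldl (aCost (l.length : Int)) ((l.length : Int) - 1) =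
      (PySem.List.pyRange 0 (l.length : Int) 1).foldl (bStep l (l.length : Int)) ((l.length : Int) - 1) := by
  set n := (l.length : Int) with hn
  have hn0 : 0 ≤ n := by simp [hn]
  rw [aCost_eq, bStep_eq]
  apply le_antisymm
  · -- A-side fold ≤ B-side fold
    apply le_foldl_min2 (fBx l n) (gBx l n)
    · exact foldl_min2_le_init (fAx n) (gAx n) _ _
    · intro i hi
      obtain ⟨hi0, hin⟩ := PySem.List.mem_pyRange_one.1 hi
      have hge : i + 1 ≤ altSkip l (i + 1) := altSkip_ge l (i + 1)
      have hle : altSkip l (i + 1) ≤ n := altSkip_le l (i + 1) (by omega)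
      have hinit : (finalW l).foldl (fun m x => min (min m (fAx n x)) (gAx n x)) (n - 1) ≤ n - 1 :=
        foldl_min2_le_init (fAx n) (gAx n) _ _
      by_cases hcase : altSkip l (i + 1) = i + 1
      · simp only [fBx, gBx, hcase]
        omega
      · have hmid : PySem.List.pyGet? l (i + 1) = some 'A' :=
          altSkip_mid l (i + 1) (i + 1) le_rfl (by omega)
        have hAA : AAt l (i + 1) :=
          (AAt_iff_pyGet l (i + 1) (by omega) (by omega)).2 hmid
        have hcovres := finalW_cov l (i + 1).toNat (by omega)
          (by rwa [Int.toNat_of_nonneg (by omega : (0:Int) ≤ i + 1)])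
        rw [Int.toNat_of_nonneg (by omega : (0:Int) ≤ i + 1)] at hcovres
        obtain ⟨se, hse, hs, he⟩ := hcovres
        obtain ⟨g1, g2, g3, g4, g5⟩ := finalW_sound l se hse
        have heq : se.2 = altSkip l (i + 1) - 1 := by
          by_cases hup : altSkip l (i + 1) ≤ se.2
          · exfalso
            have hAn : AAt l (altSkip l (i + 1)) := g4 _ (by omega) (by omega)
            have := altSkip_stop l (i + 1) (by omega)
            exact this ((AAt_iff_pyGet l _ (by omega) (by omega)).1 hAn)
          · by_cases hlow : se.2 + 1 < altSkip l (i + 1)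
            · exfalso
              have hAe : AAt l (se.2 + 1) :=
                (AAt_iff_pyGet l _ (by omega) (by omega)).2
                  (altSkip_mid l (i + 1) (se.2 + 1) (by omega) hlow)
              rcases g5 with h | h
              · omega
              · exact h hAe
            · omega
        have hmem := foldl_min2_le_mem (fAx n) (gAx n) (finalW l) (n - 1) hse
        have hsg : 0 ≤ sgOf se ∧ sgOf se ≤ i := by
          simp only [sgOf]; split <;> omega
        have heg : egOf n se = n - altSkip l (i + 1) := by
          simp only [egOf]; split <;> omega
        have hfa : fAx n se = (n - altSkip l (i + 1)) * 2 + sgOf se := by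
          simp only [fAx, heg]
        have hga : gAx n se = sgOf se * 2 + (n - altSkip l (i + 1)) := by
          simp only [gAx, heg]
        rw [hfa, hga] at hmem
        simp only [fBx, gBx]
        omega
  · -- B-side fold ≤ A-side fold
    apply le_foldl_min2 (fAx n) (gAx n)
    · exact foldl_min2_le_init (fBx l n) (gBx l n) _ _
    · intro se hse
      obtain ⟨g1, g2, g3, g4, g5⟩ := finalW_sound l se hse
      have hi0 : 0 ≤ sgOf se := by simp only [sgOf]; split <;> omega
      have hin : sgOf se < n := by simp only [sgOf]; split <;> omega
      have hile : sgOf se ≤ se.2 := by simp only [sgOf]; split <;> omega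
      have himem : sgOf se ∈ PySem.List.pyRange 0 n 1 := PySem.List.mem_pyRange_one.2 ⟨hi0, hin⟩
      have hskip : altSkip l (sgOf se + 1) = se.2 + 1 := by
        apply altSkip_eq l (sgOf se + 1) (se.2 + 1) (by omega) (by omega)
        · intro j hj1 hj2
          have hsj : se.1 ≤ j := by simp only [sgOf] at hj1; split at hj1 <;> omega
          exact (AAt_iff_pyGet l j (by omega) (by omega)).1 (g4 j hsj (by omega))
        · rcases g5 with h | h
          · exact Or.inl h
          · by_cases hend : se.2 + 1 = n
            · exact Or.inl hend
            · exact Or.inr (fun hp =>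
                h ((AAt_iff_pyGet l _ (by omega) (by omega)).2 hp))
      have hmem := foldl_min2_le_mem (fBx l n) (gBx l n) (PySem.List.pyRange 0 n 1) (n - 1) himem
      have hfb : fBx l n (sgOf se) = 2 * sgOf se + (n - (se.2 + 1)) := by
        simp only [fBx, hskip]
      have hgb : gBx l n (sgOf se) = sgOf se + 2 * (n - (se.2 + 1)) := by
        simp only [gBx, hskip]
      rw [hfb, hgb] at hmem
      have heg : egOf n se = n - se.2 - 1 := by simp only [egOf]; split <;> omega
      have hfa : fAx n se = (n - se.2 - 1) * 2 + sgOf se := by simp only [fAx, heg]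
      have hga : gAx n se = sgOf se * 2 + (n - se.2 - 1) := by simp only [gAx, heg]
      rw [hfa, hga]
      omega

-- ===== VERDICT (by name: the statement is the Claim_ definition above) =====
theorem solution_spec : Claim_equal_solution := by
  intro name _
  show solution name = solution_alt name
  have hA : solution name = name.toList.foldl (fun s c => s + udA c) 0 +
      (finalW name.toList).foldl (aCost (name.toList.length : Int))
        ((name.toList.length : Int) - 1) := by
    unfold solution finalW
    dsimp only
    have hsplit := aFold_split name.toList 0 0 [] false (-1)
    rw [Nat.cast_zero] at hsplit
    rw [hsplit]
    dsimp only
    simp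
  have hB : solution_alt name = name.toList.foldl (fun s c => s + udA c) 0 +
      (PySem.List.pyRange 0 (name.toList.length : Int) 1).foldl
        (bStep name.toList (name.toList.length : Int)) ((name.toList.length : Int) - 1) := by
    unfold solution_alt
    dsimp only
    have hfun : (fun (a : Int) (c : Char) => a + min ((c.toNat : Int) - 65) (91 - (c.toNat : Int)))
        = fun (s : Int) (c : Char) => s + udA c := by
      funext a c
      rw [udA_eq_min]
    rw [hfun]
  rw [hA, hB, move_eq]
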